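-- pv_equiv track=rewrite | github.com/oomlout/oomlout_OOMP_V2 | old/OOMPeda.py | runKicadSymbol
-- ===== SOURCE A (Python) =====
-- def runKicadSymbol(line):
--     returnValue = True
--     for x in range(9):
--         for y in range(9):
--             testString = "_" + str(x) + "_" + str(y)
--             if testString in line:
--                 returnValue = False
--     return returnValue
-- ===== SOURCE B (Python) =====
-- import re
--
-- _PAT = re.compile(r'_[0-8]_[0-8]')
--
-- def runKicadSymbol(line):
--     return _PAT.search(line) is None
-- ===== Notes on version B (the rewrite author's own statement) =====
-- stated objective: idiomatic
-- what changed: Replaced the 81 separate substring searches (9x9 loop building '_x_y' strings) with a single compiled regular-expression scan r'_[0-8]_[0-8]' over the line.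
import Mathlib
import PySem

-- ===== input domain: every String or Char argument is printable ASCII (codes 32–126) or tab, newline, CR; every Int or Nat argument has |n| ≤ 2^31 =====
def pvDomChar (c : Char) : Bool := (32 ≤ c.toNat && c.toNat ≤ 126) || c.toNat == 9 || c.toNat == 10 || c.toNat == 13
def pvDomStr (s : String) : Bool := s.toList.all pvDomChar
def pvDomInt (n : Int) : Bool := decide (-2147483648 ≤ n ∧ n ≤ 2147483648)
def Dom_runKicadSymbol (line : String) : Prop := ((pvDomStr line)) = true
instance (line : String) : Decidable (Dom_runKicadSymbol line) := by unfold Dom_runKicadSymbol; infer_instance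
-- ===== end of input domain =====

-- B replaces A's 81 separate substring searches with one single left-to-right scan
-- for the pattern '_[0-8]_[0-8]' (a regex search in the Python); objective: idiomatic.

-- ===== PORT A =====
-- literal port of A: nested loops over range(9), testString = "_"+str(x)+"_"+str(y),
-- 'testString in line' checked by PySem.Chars.isIn on the character lists.
def runKicadSymbol (line : String) : Bool :=
  (PySem.List.pyRange 0 9 1).foldl (fun rv x =>
    (PySem.List.pyRange 0 9 1).foldl (fun rv y =>
      let testString := ['_'] ++ PySem.Int.toChars x ++ ['_'] ++ PySem.Int.toChars y
      if PySem.Chars.isIn testString line.toList then false else rv) rv) true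

-- ===== PORT B =====
-- character class [0-8] of the regex
def pvIsXY (c : Char) : Bool := '0' ≤ c && c ≤ '8'

-- single pass: does the pattern '_[0-8]_[0-8]' occur anywhere? (= re.search ≠ None)
def pvScan : List Char → Bool
  | a :: b :: c :: d :: rest =>
      (a = '_' && pvIsXY b && c = '_' && pvIsXY d) || pvScan (b :: c :: d :: rest)
  | _ => false

def runKicadSymbol_alt (line : String) : Bool := !pvScan line.toList

-- ===== PRECONDITION & SPEC =====
def Spec_runKicadSymbol (line : String) (out : Bool) : Prop := out = runKicadSymbol_alt line
instance (line : String) (out : Bool) : Decidable (Spec_runKicadSymbol line out) := by unfold Spec_runKicadSymbol; infer_instance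

-- ===== CLAIM (what is proved, stated in full; the proofs are below) =====
def Claim_equal_runKicadSymbol : Prop := ∀ (line : String), Dom_runKicadSymbol line → Spec_runKicadSymbol line (runKicadSymbol line)

-- ===== LEMMAS AND PROOFS =====

-- loop shape of A's inner loop: rv is set to false exactly when some test fires
lemma foldl_sticky {α : Type} (p : α → Bool) (ts : List α) (rv : Bool) :
    ts.foldl (fun r t => if p t then false else r) rv = (rv && !ts.any p) := by
  induction ts generalizing rv with
  | nil => simp
  | cons t ts ih =>
    simp only [List.foldl_cons]
    rw [ih]
    cases h : p t <;> simp [h]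

-- loop shape of A's outer loop after the inner one is rewritten
lemma foldl_and_not {α : Type} (q : α → Bool) (ts : List α) (rv : Bool) :
    ts.foldl (fun r t => r && !q t) rv = (rv && !ts.any q) := by
  induction ts generalizing rv with
  | nil => simp
  | cons t ts ih => simp [ih, Bool.and_assoc]

-- the 4-character pattern is a prefix of a list iff the first four characters match it
lemma prefix_patt {d1 d2 a b c d : Char} {rest : List Char} :
    ['_', d1, '_', d2] <+: a :: b :: c :: d :: rest ↔ (a = '_' ∧ d1 = b ∧ c = '_' ∧ d2 = d) := by
  constructor
  · rintro ⟨t, ht⟩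
    simp only [List.cons_append, List.nil_append, List.cons.injEq] at ht
    exact ⟨ht.1.symm, ht.2.1, ht.2.2.1.symm, ht.2.2.2.1⟩
  · rintro ⟨rfl, rfl, rfl, rfl⟩
    exact ⟨rest, rfl⟩

-- pvScan finds the pattern iff some infix of the list is '_d1_d2' with d1,d2 in the class
lemma pvScan_iff (cs : List Char) :
    pvScan cs = true ↔ ∃ d1 d2, pvIsXY d1 ∧ pvIsXY d2 ∧ ['_', d1, '_', d2] <:+: cs := by
  induction cs with
  | nil =>
    simp only [pvScan]
    constructor
    · intro h; cases h
    · rintro ⟨d1, d2, _, _, h⟩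
      have := h.length_le; simp at this
  | cons a cs ih =>
    match cs, ih with
    | b :: c :: d :: rest, ih =>
      simp only [pvScan, Bool.or_eq_true, Bool.and_eq_true, decide_eq_true_eq]
      rw [ih]
      constructor
      · rintro (⟨⟨⟨ha, hb⟩, hc⟩, hd⟩ | ⟨d1, d2, h1, h2, h⟩)
        · subst ha hc
          exact ⟨b, d, hb, hd, (⟨[], rest, rfl⟩ : _ <:+: _)⟩
        · exact ⟨d1, d2, h1, h2, h.trans (List.suffix_cons a _).isInfix⟩
      · rintro ⟨d1, d2, h1, h2, h⟩
        rcases List.infix_cons_iff.mp h with hpre | hinf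
        · rcases prefix_patt.mp hpre with ⟨rfl, rfl, rfl, rfl⟩
          exact Or.inl ⟨⟨⟨rfl, h1⟩, rfl⟩, h2⟩
        · exact Or.inr ⟨d1, d2, h1, h2, hinf⟩
    | [], _ =>
      simp only [pvScan]
      constructor
      · intro h; cases h
      · rintro ⟨d1, d2, _, _, h⟩; have := h.length_le; simp at this
    | [b], _ =>
      simp only [pvScan]
      constructor
      · intro h; cases h
      · rintro ⟨d1, d2, _, _, h⟩; have := h.length_le; simp at this
    | [b, c], _ =>
      simp only [pvScan]
      constructor
      · intro h; cases h
      · rintro ⟨d1, d2, _, _, h⟩; have := h.length_le; simp at this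

-- the digit characters A's loop generates are exactly the class pvIsXY
lemma toChars_of_mem (x : Int) (hx : x ∈ PySem.List.pyRange 0 9 1) :
    ∃ d : Char, PySem.Int.toChars x = [d] ∧ pvIsXY d := by
  have h9 : PySem.List.pyRange 0 9 1 = [0, 1, 2, 3, 4, 5, 6, 7, 8] := by decide
  rw [h9] at hx
  fin_cases hx
  exacts [⟨'0', by decide, by decide⟩, ⟨'1', by decide, by decide⟩,
    ⟨'2', by decide, by decide⟩, ⟨'3', by decide, by decide⟩,
    ⟨'4', by decide, by decide⟩, ⟨'5', by decide, by decide⟩,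
    ⟨'6', by decide, by decide⟩, ⟨'7', by decide, by decide⟩,
    ⟨'8', by decide, by decide⟩]

lemma exists_int_of_isXY (d : Char) (hd : pvIsXY d) :
    ∃ x ∈ PySem.List.pyRange 0 9 1, PySem.Int.toChars x = [d] := by
  simp only [pvIsXY, Bool.and_eq_true, decide_eq_true_eq] at hd
  obtain ⟨h1, h2⟩ := hd
  have hl : 48 ≤ d.toNat := h1
  have hr : d.toNat ≤ 56 := h2
  have hofNat : Char.ofNat d.toNat = d := Char.ofNat_toNat d
  interval_cases h : d.toNat
  exacts [⟨0, by decide, by rw [← hofNat]; decide⟩, ⟨1, by decide, by rw [← hofNat]; decide⟩,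
    ⟨2, by decide, by rw [← hofNat]; decide⟩, ⟨3, by decide, by rw [← hofNat]; decide⟩,
    ⟨4, by decide, by rw [← hofNat]; decide⟩, ⟨5, by decide, by rw [← hofNat]; decide⟩,
    ⟨6, by decide, by rw [← hofNat]; decide⟩, ⟨7, by decide, by rw [← hofNat]; decide⟩,
    ⟨8, by decide, by rw [← hofNat]; decide⟩]

-- ===== VERDICT (by name: the statement is the Claim_ definition above) =====
theorem runKicadSymbol_spec : Claim_equal_runKicadSymbol := by
  intro line _
  unfold Spec_runKicadSymbol runKicadSymbol runKicadSymbol_alt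
  simp only [foldl_sticky, foldl_and_not, Bool.true_and]
  congr 1
  rcases h : pvScan line.toList with _ | _
  · -- no pattern: no test fires
    rw [List.any_eq_false]
    intro x hx
    rw [Bool.not_eq_true, List.any_eq_false]
    intro y hy
    obtain ⟨d1, hd1, hx1⟩ := toChars_of_mem x hx
    obtain ⟨d2, hd2, hy1⟩ := toChars_of_mem y hy
    rw [Bool.not_eq_true]
    simp only [hd1, hd2]
    rw [PySem.Chars.isIn_eq_false_iff]
    intro hinf
    have : pvScan line.toList = true := (pvScan_iff _).mpr ⟨d1, d2, hx1, hy1, hinf⟩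
    rw [h] at this; cases this
  · -- pattern found: some test fires
    obtain ⟨d1, d2, h1, h2, hinf⟩ := (pvScan_iff _).mp h
    obtain ⟨x, hx, hx1⟩ := exists_int_of_isXY d1 h1
    obtain ⟨y, hy, hy1⟩ := exists_int_of_isXY d2 h2
    rw [List.any_eq_true]
    refine ⟨x, hx, ?_⟩
    rw [List.any_eq_true]
    refine ⟨y, hy, ?_⟩
    simp only [hx1, hy1]
    exact (PySem.Chars.isIn_iff_infix _ _).mpr hinf
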